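-- pv_equiv track=rewrite | github.com/alexandraback/datacollection | solutions_5738606668808192_0/Python/Lellow/CoinJam.py | convert
-- ===== SOURCE A (Python) =====
-- def convert(n,b):
--     s=0
--     i=0
--     while(n!=0):
--         s+=(n%10)*b**i
--         n=n//10
--         i+=1
--     return s
-- ===== SOURCE B (Python) =====
-- def convert(n, b):
--     # Horner's method over the decimal digits most-significant-first.
--     s = 0
--     for ch in str(n):
--         s = s * b + int(ch)
--     return s
-- ===== Notes on version B (the rewrite author's own statement) =====
-- stated objective: simpler
-- what changed: Replaces the LSB-first while-loop with explicit powers b**i by a Horner accumulator over the decimal digits of str(n) most-significant-first, with no power computation.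
import Mathlib
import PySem

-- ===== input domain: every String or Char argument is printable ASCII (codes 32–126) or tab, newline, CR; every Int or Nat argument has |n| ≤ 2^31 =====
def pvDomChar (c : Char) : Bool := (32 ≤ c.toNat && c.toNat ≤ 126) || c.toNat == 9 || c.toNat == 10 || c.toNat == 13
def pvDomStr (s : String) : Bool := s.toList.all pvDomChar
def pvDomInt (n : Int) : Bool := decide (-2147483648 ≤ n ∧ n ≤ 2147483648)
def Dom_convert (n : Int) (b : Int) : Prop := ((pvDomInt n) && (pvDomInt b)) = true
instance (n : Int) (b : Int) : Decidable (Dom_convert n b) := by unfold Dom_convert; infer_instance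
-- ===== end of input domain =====

-- B replaces the LSB-first while-loop with explicit powers b**i by a Horner accumulator
-- over str(n)'s digits MSB-first (objective: simpler).


-- ===== PORT A =====
-- the while loop of A; the `n ≤ 0` exit is `n = 0` plus a termination guard for
-- n < 0 (where the Python loop never terminates; such n are outside Pre_convert)
def convertLoopA (b : Int) (n : Int) (s : Int) (i : Int) : Int :=
  if n ≤ 0 then s
  else convertLoopA b (PySem.Int.floordiv n 10) (s + PySem.Int.mod n 10 * b ^ i.toNat) (i + 1)
termination_by n.toNat
decreasing_by
  have := PySem.Int.floordiv_mul_add_mod n 10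
  have h2 := PySem.Int.mod_nonneg n (b := 10) (by omega)
  have h3 := PySem.Int.mod_lt n (b := 10) (by omega)
  omega

def convert (n : Int) (b : Int) : Int := convertLoopA b n 0 0

-- ===== PORT B =====
-- s = s * b + int(ch)
def convert_alt (n : Int) (b : Int) : Int :=
  (PySem.Int.toStr n).toList.foldl (fun s c => s * b + ((c.toNat : Int) - 48)) 0

-- ===== PRECONDITION & SPEC =====
-- Pre_ excludes n < 0, on which the Python A loops forever (n//10 stalls at -1) and returns nothing.
def Pre_convert (n : Int) (b : Int) : Prop := 0 ≤ n
instance (n : Int) (b : Int) : Decidable (Pre_convert n b) := by unfold Pre_convert; infer_instance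
def pvWitness_convert : Int × Int := (1234, 7)

def Spec_convert (n : Int) (b : Int) (out : Int) : Prop := out = convert_alt n b
instance (n : Int) (b : Int) (out : Int) : Decidable (Spec_convert n b out) := by unfold Spec_convert; infer_instance

-- ===== CLAIM (what is proved, stated in full; the proofs are below) =====
def Claim_equal_convert : Prop := ∀ (n : Int) (b : Int), Dom_convert n b → Pre_convert n b → Spec_convert n b (convert n b)

-- ===== LEMMAS AND PROOFS =====

-- reference value: the decimal digits of m read in base b, LSB-first recursion
def refVal (b : Int) (m : Nat) : Int :=
  if m = 0 then 0 else (m % 10 : Nat) + b * refVal b (m / 10)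

-- MSB-first Horner accumulator over the decimal digits of m
def hornerNat (b : Int) (m : Nat) (acc : Int) : Int :=
  if m / 10 = 0 then acc * b + (m % 10 : Nat)
  else hornerNat b (m / 10) acc * b + (m % 10 : Nat)
decreasing_by exact Nat.div_lt_self (by omega) (by omega)

lemma digitChar_toNat (m : Nat) (hm : m < 10) : (Nat.digitChar m).toNat = m + 48 := by
  interval_cases m <;> rfl

-- Horner fold over Nat.toDigitsCore
lemma foldl_toDigitsCore (b : Int) (fuel m : Nat) (hf : 0 < fuel) (hm : m < 10 ^ fuel) :
    ∀ (ds : List Char) (acc : Int),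
      (Nat.toDigitsCore 10 fuel m ds).foldl (fun s c => s * b + ((c.toNat : Int) - 48)) acc =
      ds.foldl (fun s c => s * b + ((c.toNat : Int) - 48)) (hornerNat b m acc) := by
  induction fuel generalizing m with
  | zero => omega
  | succ fuel ih =>
    intro ds acc
    rw [Nat.toDigitsCore, hornerNat]
    by_cases h0 : m / 10 = 0
    · simp only [h0, if_pos, List.foldl_cons]
      rw [digitChar_toNat _ (Nat.mod_lt _ (by omega))]
      push_cast
      ring_nf
    · have hm' : m / 10 < 10 ^ fuel := by
        rw [Nat.div_lt_iff_lt_mul (by omega)]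
        calc m < 10 ^ (fuel + 1) := hm
          _ = 10 ^ fuel * 10 := by ring
      have hf' : 0 < fuel := by
        by_contra h
        have hz : fuel = 0 := by omega
        subst hz
        simp at hm
        omega
      simp only [h0, if_false]
      rw [ih _ hf' hm']
      simp only [List.foldl_cons]
      rw [digitChar_toNat _ (Nat.mod_lt _ (by omega))]
      push_cast
      ring_nf

lemma hornerNat_zero (b : Int) (m : Nat) : hornerNat b m 0 = refVal b m := by
  induction m using Nat.strong_induction_on with
  | _ m ih =>
    rw [hornerNat, refVal]
    by_cases h0 : m / 10 = 0
    · rw [if_pos h0]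
      by_cases hm0 : m = 0
      · subst hm0; norm_num
      · rw [if_neg hm0, h0, refVal, if_pos rfl]
        push_cast
        ring
    · rw [if_neg h0, if_neg (by omega), ih (m / 10) (Nat.div_lt_self (by omega) (by omega))]
      rw [refVal]
      push_cast
      ring

-- A's loop computes s + b^i * refVal
lemma convertLoopA_eq (b : Int) (m : Nat) :
    ∀ (s i : Int), 0 ≤ i → convertLoopA b (m : Int) s i = s + b ^ i.toNat * refVal b m := by
  induction m using Nat.strong_induction_on with
  | _ m ih =>
    intro s i hi
    rw [convertLoopA, refVal]
    by_cases h0 : m = 0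
    · subst h0; norm_num
    · have hpos : ¬ ((m : Int) ≤ 0) := by
        simp only [not_le]; exact_mod_cast Nat.pos_of_ne_zero h0
      rw [if_neg hpos, if_neg h0]
      rw [show ((10 : Int)) = ((10 : Nat) : Int) from rfl,
          PySem.Int.floordiv_natCast, PySem.Int.mod_natCast]
      rw [ih (m / 10) (Nat.div_lt_self (Nat.pos_of_ne_zero h0) (by omega)) _ _ (by omega)]
      have : (i + 1).toNat = i.toNat + 1 := by omega
      rw [this, pow_succ]
      ring

lemma convert_alt_nonneg (n : Int) (hn : 0 ≤ n) : convert_alt n b = refVal b n.toNat := by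
  unfold convert_alt
  rw [PySem.Int.toList_toStr]
  unfold PySem.Int.toChars
  rw [if_neg (by omega)]
  unfold Nat.toDigits
  rw [foldl_toDigitsCore b (n.toNat + 1) n.toNat (by omega)
        (lt_of_lt_of_le (Nat.lt_pow_self (by omega)) (Nat.pow_le_pow_right (by omega) (by omega)))]
  simp [hornerNat_zero]

-- ===== VERDICT (by name: the statement is the Claim_ definition above) =====
theorem convert_spec : Claim_equal_convert := by
  intro n b _ hpre
  unfold Spec_convert convert
  rw [convert_alt_nonneg n hpre]
  have := convertLoopA_eq b n.toNat 0 0 (by omega)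
  rw [Int.toNat_of_nonneg hpre] at this
  simpa using this
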